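-- pv_equiv track=rewrite | github.com/OlaszPL/Introduction_to_computer_science_course | Zestaw6/zad15.py | to_remove
-- ===== SOURCE A (Python) =====
-- def to_remove(num):
--     cnt1, cnt2 = 0, 0
--
--     while num > 0:
--         if num % 3 == 1:
--             cnt1 += 1
--         elif num % 3 == 2:
--             cnt2 += 1
--         num //= 3
--
--     return cnt1 > cnt2
-- ===== SOURCE B (Python) =====
-- def to_remove(num):
--     # Signed balance of base-3 digits: digit d contributes (d+1)%3 - 1,
--     # i.e. +1 for d==1, -1 for d==2, 0 for d==0 (branchless).
--     def bal(n):
--         if n <= 0: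
--             return 0
--         return bal(n // 3) + ((n % 3 + 1) % 3 - 1)
--     return bal(num) > 0
-- ===== Notes on version B (the rewrite author's own statement) =====
-- stated objective: alternative
-- what changed: B replaces A's iterative two-counter tally with a branchless recursion computing one signed balance: each base-3 digit d contributes (d+1)%3-1 (+1 for 1, -1 for 2, 0 for 0), and B returns balance > 0; there is no if/elif digit dispatch and no pair of counters.
import Mathlib
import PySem

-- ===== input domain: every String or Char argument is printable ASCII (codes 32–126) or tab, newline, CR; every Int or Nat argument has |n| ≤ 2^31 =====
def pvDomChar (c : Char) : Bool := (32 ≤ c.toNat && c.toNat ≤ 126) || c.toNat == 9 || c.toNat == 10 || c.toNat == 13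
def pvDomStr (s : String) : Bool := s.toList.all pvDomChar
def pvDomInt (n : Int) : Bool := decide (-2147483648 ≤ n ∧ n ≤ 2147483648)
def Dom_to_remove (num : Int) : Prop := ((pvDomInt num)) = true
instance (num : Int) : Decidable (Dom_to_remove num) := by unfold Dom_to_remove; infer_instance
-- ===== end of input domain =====

-- B computes one signed balance recursively and branchlessly ((d+1)%3-1 per base-3 digit) instead of A's iterative two-counter tally; objective: alternative decomposition, same cost.


-- ===== PORT A =====
-- A's while loop carrying the two counters cnt1, cnt2
def to_remove_loop (num c1 c2 : Int) : Bool :=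
  if num > 0 then
    if PySem.Int.mod num 3 = 1 then
      to_remove_loop (PySem.Int.floordiv num 3) (c1 + 1) c2
    else if PySem.Int.mod num 3 = 2 then
      to_remove_loop (PySem.Int.floordiv num 3) c1 (c2 + 1)
    else
      to_remove_loop (PySem.Int.floordiv num 3) c1 c2
  else
    decide (c1 > c2)
termination_by num.toNat
decreasing_by all_goals (simp only [PySem.Int.floordiv_eq_ediv_of_pos (by omega : (0:Int) < 3)]; omega)

def to_remove (num : Int) : Bool := to_remove_loop num 0 0

-- ===== PORT B =====
-- B's recursive branchless signed balance: digit d contributes (d+1)%3 - 1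
def to_remove_bal (n : Int) : Int :=
  if n ≤ 0 then 0
  else to_remove_bal (PySem.Int.floordiv n 3) + (PySem.Int.mod (PySem.Int.mod n 3 + 1) 3 - 1)
termination_by n.toNat
decreasing_by simp only [PySem.Int.floordiv_eq_ediv_of_pos (by omega : (0:Int) < 3)]; omega

def to_remove_alt (num : Int) : Bool := decide (to_remove_bal num > 0)

-- ===== PRECONDITION & SPEC =====
def Spec_to_remove (num : Int) (out : Bool) : Prop := out = to_remove_alt num
instance (num : Int) (out : Bool) : Decidable (Spec_to_remove num out) := by unfold Spec_to_remove; infer_instance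

-- ===== CLAIM =====
def Claim_equal_to_remove : Prop := ∀ (num : Int), Dom_to_remove num → Spec_to_remove num (to_remove num)

-- ===== LEMMAS AND PROOFS =====
theorem to_remove_loop_eq (num c1 c2 : Int) :
    to_remove_loop num c1 c2 = decide (c1 - c2 + to_remove_bal num > 0) := by
  induction num, c1, c2 using to_remove_loop.induct with
  | case1 num c1 c2 hpos h1 ih =>
    rw [to_remove_loop, to_remove_bal, if_pos hpos, if_neg (by omega : ¬ num ≤ 0), ih, h1]
    norm_num [PySem.Int.mod]
    rw [show Int.fmod 2 3 = 2 from by decide]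
    omega
  | case2 num c1 c2 hpos h1 h2 ih =>
    rw [to_remove_loop, to_remove_bal, if_pos hpos, if_neg (by omega : ¬ num ≤ 0), ih, h2]
    norm_num [PySem.Int.mod]
    omega
  | case3 num c1 c2 hpos h1 h2 ih =>
    have h0 : PySem.Int.mod num 3 = 0 := by
      have hnn := PySem.Int.mod_nonneg num (by omega : (0:Int) < 3)
      have hlt := PySem.Int.mod_lt num (by omega : (0:Int) < 3)
      omega
    rw [to_remove_loop, to_remove_bal, if_pos hpos, if_neg (by omega : ¬ num ≤ 0), ih, h0]
    norm_num [PySem.Int.mod]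
    rw [show Int.fmod 1 3 = 1 from by decide]
    omega
  | case4 num c1 c2 hpos =>
    rw [to_remove_loop, to_remove_bal, if_neg hpos, if_pos (by omega : num ≤ 0),
      decide_eq_decide]
    omega

-- ===== VERDICT =====
theorem to_remove_spec : Claim_equal_to_remove := by
  intro num _
  unfold Spec_to_remove to_remove to_remove_alt
  rw [to_remove_loop_eq, decide_eq_decide]
  omega
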